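-- pv_equiv track=rewrite | github.com/rlzh/mec | shared/stats_report.py | get_shared_ngrams
-- ===== SOURCE A (Python) =====
-- def get_shared_ngrams(data):
--     shared_grams = set()
--     unique_grams = set()
--     for row in data:
--         for word in row:
--             if word in shared_grams:
--                 continue
--             unique_grams.add(word)
--             is_shared = True
--             for other_row in data:
--                 if word not in other_row:
--                     is_shared = False
--                     break
--             if is_shared:
--                 shared_grams.add(word)
--     return shared_grams, unique_grams
-- ===== SOURCE B (Python) =====
-- def get_shared_ngrams(data):
--     # One tally pass: count, per word, the number of rows containing it; then filter.
--     count = {}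
--     for row in data:
--         for word in dict.fromkeys(row):
--             count[word] = count.get(word, 0) + 1
--     n = len(data)
--     shared = {word for word, c in count.items() if c == n}
--     return shared, set(count)
-- ===== Notes on version B (the rewrite author's own statement) =====
-- stated objective: faster
-- what changed: Replaces A's per-word rescan of every row (membership test of each word against all rows) with a single counting pass that tallies, for each word, how many rows contain it, then filters the tally for counts equal to the number of rows.
import Mathlib
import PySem

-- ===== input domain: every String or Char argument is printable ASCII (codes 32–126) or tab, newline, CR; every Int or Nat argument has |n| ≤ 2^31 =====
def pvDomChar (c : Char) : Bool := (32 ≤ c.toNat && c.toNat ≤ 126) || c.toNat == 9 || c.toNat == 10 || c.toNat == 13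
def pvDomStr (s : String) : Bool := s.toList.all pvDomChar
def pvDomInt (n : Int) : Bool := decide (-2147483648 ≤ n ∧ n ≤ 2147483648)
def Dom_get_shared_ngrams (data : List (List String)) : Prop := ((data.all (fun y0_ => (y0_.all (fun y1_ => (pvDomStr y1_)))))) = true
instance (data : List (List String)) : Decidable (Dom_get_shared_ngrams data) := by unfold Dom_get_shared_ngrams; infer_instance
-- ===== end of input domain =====

-- B replaces A's per-word membership rescan of all rows by one counting pass over the rows
-- followed by a filter of the tally (faster); return value only — neither version mutates its argument.

-- ===== PORT A =====
-- inner 'for other_row in data: if word not in other_row: is_shared = False; break'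
def pvARowsLoop (word : String) : List (List String) → Bool
  | [] => true
  | r :: rs => if !(r.contains word) then false else pvARowsLoop word rs

-- body of A's 'for word in row' loop; state = (shared_grams, unique_grams)
def pvAStep (data : List (List String)) (st : List String × List String) (word : String) :
    List String × List String :=
  if st.1.contains word then st
  else
    let unique := PySem.Set.add st.2 word
    if pvARowsLoop word data then (PySem.Set.add st.1 word, unique) else (st.1, unique)

def get_shared_ngrams (data : List (List String)) : List String × List String :=
  data.foldl (fun st row => row.foldl (pvAStep data) st) (PySem.Set.empty, PySem.Set.empty)

-- ===== PORT B =====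
def get_shared_ngrams_alt (data : List (List String)) : List String × List String :=
  let count : PySem.Dict String Int :=
    data.foldl
      (fun c row => (PySem.List.dedup row).foldl (fun c w => c.insert w (c.getD w 0 + 1)) c)
      PySem.Dict.empty
  let n : Int := data.length
  let shared := (count.items.filter (fun p => p.2 == n)).map Prod.fst
  (shared, count.keys)

-- ===== PRECONDITION & SPEC =====
def Spec_get_shared_ngrams (data : List (List String)) (out : List String × List String) : Prop := out = get_shared_ngrams_alt data
instance (data : List (List String)) (out : List String × List String) : Decidable (Spec_get_shared_ngrams data out) := by unfold Spec_get_shared_ngrams; infer_instance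

-- ===== CLAIM (what is proved, stated in full; the proofs are below) =====
def Claim_equal_get_shared_ngrams : Prop := ∀ (data : List (List String)), Dom_get_shared_ngrams data → Spec_get_shared_ngrams data (get_shared_ngrams data)

-- ===== LEMMAS AND PROOFS =====

-- A's inner rows loop is the 'all rows contain the word' test
theorem pvARowsLoop_eq_all (word : String) (l : List (List String)) :
    pvARowsLoop word l = l.all (fun r => r.contains word) := by
  induction l with
  | nil => rfl
  | cons r rs ih =>
    simp [pvARowsLoop, ih]

-- invariant of A's word loop: shared is always unique filtered by the all-rows test
theorem pvAStep_foldl (data : List (List String)) (p : String → Bool)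
    (hP : ∀ w, pvARowsLoop w data = p w) (ws : List String) :
    ∀ u : List String,
      ws.foldl (pvAStep data) (u.filter p, u)
        = ((ws.foldl PySem.Set.add u).filter p, ws.foldl PySem.Set.add u) := by
  induction ws with
  | nil => intro u; rfl
  | cons w ws ih =>
    intro u
    have hstep : pvAStep data (u.filter p, u) w
        = ((PySem.Set.add u w).filter p, PySem.Set.add u w) := by
      unfold pvAStep
      by_cases hm : w ∈ u
      · have hadd : PySem.Set.add u w = u := PySem.Set.add_of_mem hm
        by_cases hp : p w = true
        · have h1 : (u.filter p).contains w = true := by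
            rw [List.contains_iff_mem, List.mem_filter]; exact ⟨hm, hp⟩
          rw [h1, if_pos rfl, hadd]
        · have h1 : (u.filter p).contains w = false := by
            rw [Bool.eq_false_iff]; intro hc
            rw [List.contains_iff_mem, List.mem_filter] at hc; exact hp hc.2
          rw [h1, if_neg (by simp), hP w, Bool.eq_false_iff.mpr hp,
            if_neg (by simp), hadd]
      · have hadd : PySem.Set.add u w = u ++ [w] := PySem.Set.add_of_not_mem hm
        have h1 : (u.filter p).contains w = false := by
          rw [Bool.eq_false_iff]; intro hc
          rw [List.contains_iff_mem, List.mem_filter] at hc; exact hm hc.1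
        rw [h1, if_neg (by simp), hP w]
        by_cases hp : p w = true
        · have h2 : PySem.Set.add (u.filter p) w = u.filter p ++ [w] :=
            PySem.Set.add_of_not_mem (fun hc => hm (List.mem_filter.mp hc).1)
          rw [hp, if_pos rfl, h2, hadd, List.filter_append, List.filter_singleton]
          simp [hp]
        · rw [Bool.eq_false_iff.mpr hp, if_neg (by simp), hadd, List.filter_append,
            List.filter_singleton]
          simp [Bool.eq_false_iff.mpr hp]
    rw [List.foldl_cons, hstep, ih (PySem.Set.add u w), List.foldl_cons]

-- A computes (filter of the seen-set, seen-set) over the flattened word stream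
theorem getA_eq (data : List (List String)) :
    get_shared_ngrams data
      = ((PySem.Set.ofList data.flatten).filter (fun w => data.all (fun r => r.contains w)),
         PySem.Set.ofList data.flatten) := by
  have h := pvAStep_foldl data (fun w => data.all (fun r => r.contains w))
    (fun w => pvARowsLoop_eq_all w data) data.flatten []
  simp only [List.filter_nil] at h
  calc get_shared_ngrams data
      = data.flatten.foldl (pvAStep data) ([], []) := (List.foldl_flatten).symm
    _ = _ := by rw [h, PySem.Set.ofList_eq_foldl]

-- folding Set.add appends exactly the fresh distinct elements
theorem foldl_add_eq (l : List String) :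
    ∀ s : List String,
      l.foldl PySem.Set.add s = s ++ (PySem.Set.ofList l).filter (fun y => !(s.contains y)) := by
  induction l with
  | nil => intro s; simp [PySem.Set.ofList]
  | cons x l ih =>
    intro s
    rw [List.foldl_cons, ih (PySem.Set.add s x), PySem.Set.ofList_cons, PySem.Set.discard]
    by_cases hm : x ∈ s
    · have hadd : PySem.Set.add s x = s := PySem.Set.add_of_mem hm
      have hx : s.contains x = true := List.contains_iff_mem.mpr hm
      rw [hadd]
      simp only [List.filter_cons, hx, Bool.not_true, List.filter_filter]
      congr 1
      apply List.filter_congr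
      intro y _
      by_cases hy : y = x
      · subst hy; simp [hm]
      · simp [hy]
    · have hadd : PySem.Set.add s x = s ++ [x] := PySem.Set.add_of_not_mem hm
      have hx : s.contains x = false := by
        rw [Bool.eq_false_iff]; intro hc; exact hm (List.contains_iff_mem.mp hc)
      rw [hadd]
      simp only [List.filter_cons, hx, Bool.not_false, List.filter_filter, List.append_assoc,
        List.cons_append, List.nil_append]
      congr 2
      apply List.filter_congr
      intro y _
      by_cases hy : y = x
      · subst hy; simp
      · have : (s ++ [x]).contains y = s.contains y := by
          by_cases hys : y ∈ s
          · simp [hys]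
          · have h1 : (s ++ [x]).contains y = false := by
              rw [Bool.eq_false_iff]; intro hc
              rcases List.mem_append.mp (List.contains_iff_mem.mp hc) with h | h
              · exact hys h
              · exact hy (List.mem_singleton.mp h)
            have h2 : s.contains y = false := by
              rw [Bool.eq_false_iff]; intro hc; exact hys (List.contains_iff_mem.mp hc)
            rw [h1, h2]
        simp [hy]

-- folding Set.add over the deduplicated list equals folding over the original list
theorem foldl_add_dedup (l : List String) (s : List String) :
    (PySem.List.dedup l).foldl PySem.Set.add s = l.foldl PySem.Set.add s := by
  rw [PySem.List.dedup, foldl_add_eq, foldl_add_eq,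
    PySem.Set.ofList_eq_self_of_nodup (PySem.Set.ofList l) (PySem.Set.nodup_ofList l)]

-- the word stream B counts over has the same distinct elements, in the same order, as A's
theorem ofList_dedup_flatten (data : List (List String)) :
    PySem.Set.ofList (data.map PySem.List.dedup).flatten = PySem.Set.ofList data.flatten := by
  rw [PySem.Set.ofList_eq_foldl, PySem.Set.ofList_eq_foldl, List.foldl_flatten,
    List.foldl_flatten, List.foldl_map]
  suffices h : ∀ s : List String,
      data.foldl (fun s r => (PySem.List.dedup r).foldl PySem.Set.add s) s
        = data.foldl (fun s r => r.foldl PySem.Set.add s) s from h []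
  induction data with
  | nil => intro s; rfl
  | cons r rs ih => intro s; rw [List.foldl_cons, List.foldl_cons, foldl_add_dedup, ih]

-- B's tally of a word = number of rows containing it
theorem count_dedup_flatten (data : List (List String)) (w : String) :
    ((data.map PySem.List.dedup).flatten).count w = data.countP (fun r => r.contains w) := by
  rw [List.count_flatten, List.map_map]
  have hrow : ∀ r : List String, (PySem.List.dedup r).count w = if r.contains w then 1 else 0 := by
    intro r
    rw [PySem.List.dedup, List.Nodup.count (PySem.Set.nodup_ofList r)]
    by_cases h : w ∈ r
    · simp [h]
    · simp [h]
  calc (data.map (fun r => (PySem.List.dedup r).count w)).sum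
      = (data.map (fun r => if r.contains w then 1 else 0)).sum := by
        congr 1; exact List.map_congr_left (fun r _ => hrow r)
    _ = data.countP (fun r => r.contains w) :=
        PySem.List.sum_map_ite_one_zero_nat (fun r => r.contains w) data

-- ===== VERDICT (by name: the statement is the Claim_ definition above) =====
theorem get_shared_ngrams_spec : Claim_equal_get_shared_ngrams := by
  intro data _
  unfold Spec_get_shared_ngrams get_shared_ngrams_alt
  have hcount : data.foldl
      (fun c row => (PySem.List.dedup row).foldl (fun c w => c.insert w (c.getD w 0 + 1)) c)
      PySem.Dict.empty
      = PySem.Dict.counter (data.map PySem.List.dedup).flatten := by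
    rw [← PySem.Dict.foldl_insert_getD_add_one_eq_counter, List.foldl_flatten, List.foldl_map]
  rw [getA_eq]
  simp only [hcount]
  rw [PySem.Dict.items_counter, PySem.Dict.keys_counter, ofList_dedup_flatten]
  refine Prod.ext ?_ rfl
  rw [List.filter_map, List.map_map]
  have hmap : (Prod.fst ∘ fun k : String =>
      (k, (((data.map PySem.List.dedup).flatten.count k : Int)))) = id := rfl
  rw [hmap, List.map_id]
  apply List.filter_congr
  intro w _
  simp only [Function.comp]
  rw [count_dedup_flatten]
  have hfun : (fun r : List String => r.contains w) = (fun r => decide (w ∈ r)) := by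
    funext r; exact List.contains_eq_mem w r
  rw [hfun]
  by_cases hall : data.all (fun r => decide (w ∈ r)) = true
  · have hlen : data.countP (fun r => decide (w ∈ r)) = data.length :=
      List.countP_eq_length.mpr (by simpa [List.all_eq_true] using hall)
    rw [hall, hlen]
    simp
  · have hne : data.countP (fun r => decide (w ∈ r)) ≠ data.length := by
      intro h
      exact hall (by
        rw [List.all_eq_true]
        exact fun r hr => List.countP_eq_length.mp h r hr)
    have hne' : ((data.countP (fun r => decide (w ∈ r)) : Int)) ≠ (data.length : Int) := by
      exact_mod_cast hne
    rw [Bool.eq_false_iff.mpr hall]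
    simp [hne']
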